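-- pv_equiv track=rewrite | github.com/josteint/sidfinity | src/verify_note_extraction.py | extract_note_events
-- ===== SOURCE A (Python) =====
-- def extract_note_events(frames, voice):
--     """
--     Return list of note events: (fhi_at_start, first_frame, total_frames_with_that_fhi)
--     We consider a 'note event' = when fhi changes to a new value AND ctrl has gate ON.
--     """
--     events = []
--     if not frames:
--         return events
--     prev_fhi = -1
--     note_start = 0
--     for fr, frame in enumerate(frames):
--         fhi = frame['fhi'][voice]
--         ctl = frame['ctl'][voice]
--         gate = ctl & 1
--         if fhi != prev_fhi and gate:
--             if prev_fhi >= 0: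
--                 events.append({'fhi': prev_fhi, 'start': note_start,
--                                 'dur': fr - note_start, 'ctl': frames[note_start]['ctl'][voice]})
--             prev_fhi  = fhi
--             note_start = fr
--     if prev_fhi >= 0:
--         events.append({'fhi': prev_fhi, 'start': note_start,
--                         'dur': len(frames) - note_start, 'ctl': frames[note_start]['ctl'][voice]})
--     return events
-- ===== SOURCE B (Python) =====
-- def extract_note_events(frames, voice):
--     # Pass 1: collect accepted boundaries (frame index, new fhi).
--     boundaries = []
--     prev = -1
--     for i, frame in enumerate(frames):
--         fhi = frame['fhi'][voice]
--         if fhi != prev and (frame['ctl'][voice] & 1):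
--             boundaries.append((i, fhi))
--             prev = fhi
--     # Pass 2: pair each boundary with the next boundary's start (or end of frames).
--     ends = [i for i, _ in boundaries][1:] + [len(frames)]
--     events = []
--     for (start, fhi), end in zip(boundaries, ends):
--         if fhi >= 0:
--             events.append({'fhi': fhi, 'start': start, 'dur': end - start,
--                            'ctl': frames[start]['ctl'][voice]})
--     return events
-- ===== Notes on version B (the rewrite author's own statement) =====
-- stated objective: alternative
-- what changed: Replaces A's single stateful scan (pending-note state flushed on the next change and once after the loop) with a two-pass decomposition: pass 1 collects accepted change boundaries (index, fhi), pass 2 zips each boundary with the next boundary's start (or len(frames)) to build the events.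
import Mathlib
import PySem

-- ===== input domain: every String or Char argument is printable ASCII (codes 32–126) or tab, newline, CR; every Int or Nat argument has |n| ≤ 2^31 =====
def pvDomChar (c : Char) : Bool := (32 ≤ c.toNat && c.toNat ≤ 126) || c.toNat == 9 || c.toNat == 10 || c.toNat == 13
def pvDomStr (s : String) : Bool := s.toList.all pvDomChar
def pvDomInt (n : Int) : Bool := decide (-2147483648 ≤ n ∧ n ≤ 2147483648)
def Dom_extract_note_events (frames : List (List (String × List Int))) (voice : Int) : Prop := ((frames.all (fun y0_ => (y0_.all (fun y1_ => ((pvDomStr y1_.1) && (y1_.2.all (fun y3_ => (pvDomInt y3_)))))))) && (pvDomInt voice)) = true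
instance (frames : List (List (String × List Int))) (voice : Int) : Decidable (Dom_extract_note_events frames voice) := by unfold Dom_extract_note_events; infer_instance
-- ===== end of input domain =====

-- B re-implements extract_note_events as a two-pass decomposition (collect boundaries, then pair
-- consecutive boundaries into events); same asymptotic cost, alternative structure.


-- frame[key][voice]: first-match dict lookup, then Python indexing (total form; Pre_ keeps it in range)
def pvLook (frame : List (String × List Int)) (key : String) (voice : Int) : Int :=
  PySem.List.pyGetD ((PySem.Dict.mk frame).getD key []) voice 0

-- the event dict literal {'fhi':…, 'start':…, 'dur':…, 'ctl': frames[start]['ctl'][voice]}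
def pvEvent (frames : List (List (String × List Int))) (voice fhi start dur : Int) : List (String × Int) :=
  [("fhi", fhi), ("start", start), ("dur", dur),
   ("ctl", pvLook (PySem.List.pyGetD frames start []) "ctl" voice)]

-- ===== PORT A =====
def extract_note_events (frames : List (List (String × List Int))) (voice : Int) : List (List (String × Int)) :=
  if frames = [] then [] else
  let st := (PySem.List.enumerate frames 0).foldl
    (fun (st : List (List (String × Int)) × Int × Int) p =>
      let fhi := pvLook p.2 "fhi" voice
      let ctl := pvLook p.2 "ctl" voice
      let gate := PySem.Int.band ctl 1
      if fhi ≠ st.2.1 ∧ gate ≠ 0 then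
        ((if st.2.1 ≥ 0 then st.1 ++ [pvEvent frames voice st.2.1 st.2.2 (p.1 - st.2.2)] else st.1),
         fhi, p.1)
      else st)
    ([], -1, 0)
  if st.2.1 ≥ 0 then st.1 ++ [pvEvent frames voice st.2.1 st.2.2 ((frames.length : Int) - st.2.2)]
  else st.1

-- ===== PORT B =====
def extract_note_events_alt (frames : List (List (String × List Int))) (voice : Int) : List (List (String × Int)) :=
  let bp := (PySem.List.enumerate frames 0).foldl
    (fun (st : List (Int × Int) × Int) p =>
      let fhi := pvLook p.2 "fhi" voice
      if fhi ≠ st.2 ∧ PySem.Int.band (pvLook p.2 "ctl" voice) 1 ≠ 0 then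
        (st.1 ++ [(p.1, fhi)], fhi)
      else st)
    ([], -1)
  let ends := ((bp.1.map (·.1)).drop 1) ++ [(frames.length : Int)]
  (bp.1.zip ends).foldl
    (fun acc q =>
      if q.1.2 ≥ 0 then acc ++ [pvEvent frames voice q.1.2 q.1.1 (q.2 - q.1.1)] else acc)
    []

-- ===== PRECONDITION & SPEC =====
-- Pre_ excludes exactly the inputs where Python A raises: a frame missing the 'fhi' or 'ctl' key
-- (KeyError) or whose list at that key has no index `voice` (IndexError).
def Pre_extract_note_events (frames : List (List (String × List Int))) (voice : Int) : Prop :=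
  ∀ frame ∈ frames,
    (∃ l, (PySem.Dict.mk frame).get? "fhi" = some l ∧ PySem.Raise.InRange l.length voice) ∧
    (∃ l, (PySem.Dict.mk frame).get? "ctl" = some l ∧ PySem.Raise.InRange l.length voice)
instance (frames : List (List (String × List Int))) (voice : Int) : Decidable (Pre_extract_note_events frames voice) := by unfold Pre_extract_note_events; infer_instance
def pvWitness_extract_note_events : (List (List (String × List Int))) × Int :=
  ([[("fhi", [3]), ("ctl", [1])], [("fhi", [5]), ("ctl", [1])]], 0)

def Spec_extract_note_events (frames : List (List (String × List Int))) (voice : Int) (out : List (List (String × Int))) : Prop := out = extract_note_events_alt frames voice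
instance (frames : List (List (String × List Int))) (voice : Int) (out : List (List (String × Int))) : Decidable (Spec_extract_note_events frames voice out) := by unfold Spec_extract_note_events; infer_instance

-- ===== CLAIM (what is proved, stated in full; the proofs are below) =====
def Claim_equal_extract_note_events : Prop := ∀ (frames : List (List (String × List Int))) (voice : Int), Dom_extract_note_events frames voice → Pre_extract_note_events frames voice → Spec_extract_note_events frames voice (extract_note_events frames voice)

-- ===== LEMMAS AND PROOFS =====

-- accepted-boundary list of the scan, as a structural recursion over the enumerated frames
def pvBgo (voice : Int) : List (Int × List (String × List Int)) → Int → List (Int × Int)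
  | [], _ => []
  | p :: rest, prev =>
    let fhi := pvLook p.2 "fhi" voice
    if fhi ≠ prev ∧ PySem.Int.band (pvLook p.2 "ctl" voice) 1 ≠ 0 then
      (p.1, fhi) :: pvBgo voice rest fhi
    else pvBgo voice rest prev

def pvPrev (voice : Int) : List (Int × List (String × List Int)) → Int → Int
  | [], prev => prev
  | p :: rest, prev =>
    let fhi := pvLook p.2 "fhi" voice
    if fhi ≠ prev ∧ PySem.Int.band (pvLook p.2 "ctl" voice) 1 ≠ 0 then
      pvPrev voice rest fhi
    else pvPrev voice rest prev

def pvStart (voice : Int) : List (Int × List (String × List Int)) → Int → Int → Int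
  | [], _, start => start
  | p :: rest, prev, start =>
    let fhi := pvLook p.2 "fhi" voice
    if fhi ≠ prev ∧ PySem.Int.band (pvLook p.2 "ctl" voice) 1 ≠ 0 then
      pvStart voice rest fhi p.1
    else pvStart voice rest prev start

def pvAgo (frames : List (List (String × List Int))) (voice : Int) :
    List (Int × List (String × List Int)) → Int → Int → List (List (String × Int))
  | [], _, _ => []
  | p :: rest, prev, start =>
    let fhi := pvLook p.2 "fhi" voice
    if fhi ≠ prev ∧ PySem.Int.band (pvLook p.2 "ctl" voice) 1 ≠ 0 then
      (if prev ≥ 0 then [pvEvent frames voice prev start (p.1 - start)] else []) ++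
        pvAgo frames voice rest fhi p.1
    else pvAgo frames voice rest prev start

def pvEmit (frames : List (List (String × List Int))) (voice N : Int) :
    List (Int × Int) → List (List (String × Int))
  | [] => []
  | [(s, f)] => if f ≥ 0 then [pvEvent frames voice f s (N - s)] else []
  | (s, f) :: q :: rest =>
    (if f ≥ 0 then [pvEvent frames voice f s (q.1 - s)] else []) ++
      pvEmit frames voice N (q :: rest)

theorem pvFoldA (frames : List (List (String × List Int))) (voice : Int)
    (l : List (Int × List (String × List Int))) :
    ∀ acc prev start,
    l.foldl
      (fun (st : List (List (String × Int)) × Int × Int) p =>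
        let fhi := pvLook p.2 "fhi" voice
        let ctl := pvLook p.2 "ctl" voice
        let gate := PySem.Int.band ctl 1
        if fhi ≠ st.2.1 ∧ gate ≠ 0 then
          ((if st.2.1 ≥ 0 then st.1 ++ [pvEvent frames voice st.2.1 st.2.2 (p.1 - st.2.2)] else st.1),
           fhi, p.1)
        else st)
      (acc, prev, start)
    = (acc ++ pvAgo frames voice l prev start, pvPrev voice l prev, pvStart voice l prev start) := by
  induction l with
  | nil => intro acc prev start; simp [pvAgo, pvPrev, pvStart]
  | cons p rest ih =>
    intro acc prev start
    simp only [List.foldl, pvAgo, pvPrev, pvStart]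
    split_ifs with h h2 <;> simp [ih, List.append_assoc]

theorem pvFoldB (voice : Int) (l : List (Int × List (String × List Int))) :
    ∀ (acc : List (Int × Int)) prev,
    l.foldl
      (fun (st : List (Int × Int) × Int) p =>
        let fhi := pvLook p.2 "fhi" voice
        if fhi ≠ st.2 ∧ PySem.Int.band (pvLook p.2 "ctl" voice) 1 ≠ 0 then
          (st.1 ++ [(p.1, fhi)], fhi)
        else st)
      (acc, prev)
    = (acc ++ pvBgo voice l prev, pvPrev voice l prev) := by
  induction l with
  | nil => intro acc prev; simp [pvBgo, pvPrev]
  | cons p rest ih =>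
    intro acc prev
    simp only [List.foldl, pvBgo, pvPrev]
    split_ifs with h <;> simp [ih, List.append_assoc]

theorem pvFoldEmit (frames : List (List (String × List Int))) (voice N : Int)
    (bs : List (Int × Int)) :
    ∀ (acc : List (List (String × Int))),
    ((bs.zip (((bs.map (·.1)).drop 1) ++ [N])).foldl
      (fun acc q =>
        if q.1.2 ≥ 0 then acc ++ [pvEvent frames voice q.1.2 q.1.1 (q.2 - q.1.1)] else acc)
      acc)
    = acc ++ pvEmit frames voice N bs := by
  induction bs with
  | nil => intro acc; simp [pvEmit]
  | cons b rest ih =>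
    intro acc
    match rest, ih with
    | [], _ =>
      obtain ⟨s, f⟩ := b
      by_cases h : f ≥ 0 <;> simp [pvEmit, h]
    | q :: rest', ih =>
      obtain ⟨s, f⟩ := b
      simp only [List.map_cons, List.drop_succ_cons, List.drop_zero] at ih ⊢
      rw [List.cons_append, List.zip_cons_cons, List.foldl_cons, ih]
      by_cases h : f ≥ 0 <;> simp [pvEmit, h, List.append_assoc]

-- the scan's state-and-output equals the boundary list rendered by pvEmit, for any pending (start, prev)
theorem pvAgoEmit (frames : List (List (String × List Int))) (voice N : Int)
    (l : List (Int × List (String × List Int))) :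
    ∀ prev start,
    pvEmit frames voice N ((start, prev) :: pvBgo voice l prev)
    = pvAgo frames voice l prev start ++
      (if pvPrev voice l prev ≥ 0 then
        [pvEvent frames voice (pvPrev voice l prev) (pvStart voice l prev start)
          (N - pvStart voice l prev start)]
       else []) := by
  induction l with
  | nil =>
    intro prev start
    by_cases h : prev ≥ 0 <;> simp [pvBgo, pvAgo, pvPrev, pvStart, pvEmit, h]
  | cons p rest ih =>
    intro prev start
    simp only [pvBgo, pvAgo, pvPrev, pvStart]
    by_cases h : pvLook p.2 "fhi" voice ≠ prev ∧ PySem.Int.band (pvLook p.2 "ctl" voice) 1 ≠ 0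
    · simp only [if_pos h]
      rw [show pvEmit frames voice N ((start, prev) :: (p.1, pvLook p.2 "fhi" voice) :: pvBgo voice rest (pvLook p.2 "fhi" voice))
            = (if prev ≥ 0 then [pvEvent frames voice prev start (p.1 - start)] else []) ++
              pvEmit frames voice N ((p.1, pvLook p.2 "fhi" voice) :: pvBgo voice rest (pvLook p.2 "fhi" voice)) from rfl]
      rw [ih]
      simp [List.append_assoc]
    · simp only [if_neg h]
      exact ih prev start

theorem pvEmitSentinel (frames : List (List (String × List Int))) (voice N : Int)
    (bs : List (Int × Int)) :
    pvEmit frames voice N ((0, -1) :: bs) = pvEmit frames voice N bs := by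
  cases bs with
  | nil => simp [pvEmit]
  | cons q rest => obtain ⟨a, b⟩ := q; simp [pvEmit]

-- ===== VERDICT (by name: the statement is the Claim_ definition above) =====
theorem extract_note_events_spec : Claim_equal_extract_note_events := by
  intro frames voice _ _
  unfold Spec_extract_note_events extract_note_events extract_note_events_alt
  rw [pvFoldA frames voice _ [] (-1) 0, pvFoldB voice _ [] (-1), pvFoldEmit]
  simp only [List.nil_append]
  by_cases hf : frames = []
  · subst hf; simp [PySem.List.enumerate, pvBgo, pvEmit]
  · rw [if_neg hf, ← pvEmitSentinel frames voice (frames.length : Int) (pvBgo voice (PySem.List.enumerate frames 0) (-1)),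
        pvAgoEmit]
    split_ifs <;> simp
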